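-- pv_equiv track=rewrite | github.com/MrSydar/sokoban-image-solver | processors/pddl.py | generate_elements
-- ===== SOURCE A (Python) =====
-- def generate_elements(game_matrix):
--     inits, goals, objects = [], [], []
--     for y in range(len(game_matrix)):
--         for x in range(len(game_matrix[y])):
--             if game_matrix[y][x] == 1:
--                 continue
--             else:
--                 obj = 'f_{}_{} '.format(x, y)
--                 if game_matrix[y][x] == 0:
--                     inits.append('(player {})\n'.format(obj))
--                 elif game_matrix[y][x] == 2:
--                     goals.append('(box {})\n'.format(obj))
--                 elif game_matrix[y][x] == 3:
--                     inits.append('(box {})\n'.format(obj))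
--                 objects.append(obj)
--     return inits, goals, objects
-- ===== SOURCE B (Python) =====
-- def generate_elements(game_matrix):
--     objects = ['f_{}_{} '.format(x, y)
--                for y, row in enumerate(game_matrix)
--                for x, v in enumerate(row) if v != 1]
--     inits = [('(player f_{}_{} )\n' if v == 0 else '(box f_{}_{} )\n').format(x, y)
--              for y, row in enumerate(game_matrix)
--              for x, v in enumerate(row) if v in (0, 3)]
--     goals = ['(box f_{}_{} )\n'.format(x, y)
--              for y, row in enumerate(game_matrix)
--              for x, v in enumerate(row) if v == 2]
--     return inits, goals, objects
-- ===== Notes on version B (the rewrite author's own statement) =====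
-- stated objective: idiomatic
-- what changed: Replaces the single index-driven nested loop that threads one (inits, goals, objects) state with three independent enumerate-based list comprehensions, one per output list with its own filter.
import Mathlib
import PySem

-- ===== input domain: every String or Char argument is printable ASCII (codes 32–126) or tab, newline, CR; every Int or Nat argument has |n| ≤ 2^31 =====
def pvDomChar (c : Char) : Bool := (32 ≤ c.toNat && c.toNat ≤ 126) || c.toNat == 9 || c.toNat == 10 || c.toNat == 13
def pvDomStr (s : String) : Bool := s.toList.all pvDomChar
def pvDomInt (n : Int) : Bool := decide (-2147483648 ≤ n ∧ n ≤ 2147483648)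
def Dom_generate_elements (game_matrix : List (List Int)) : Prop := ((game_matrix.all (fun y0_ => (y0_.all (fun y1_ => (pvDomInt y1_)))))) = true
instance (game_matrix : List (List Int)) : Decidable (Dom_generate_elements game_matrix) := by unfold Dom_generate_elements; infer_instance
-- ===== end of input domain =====

-- B replaces A's single index-driven nested loop threading one (inits, goals, objects) state
-- with three independent enumerate-based comprehensions, one per output list (objective: idiomatic).


-- ===== PORT A =====
-- literal transliteration: nested for over range(len(...)), one threaded state triple
def generate_elements (game_matrix : List (List Int)) : List String × List String × List String :=
  (PySem.List.pyRange 0 (game_matrix.length : Int) 1).foldl (fun st y =>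
    let row := PySem.List.pyGetD game_matrix y []
    (PySem.List.pyRange 0 (row.length : Int) 1).foldl (fun st x =>
      let v := PySem.List.pyGetD row x 0
      if v = 1 then st
      else
        let obj := "f_" ++ PySem.Int.toStr x ++ "_" ++ PySem.Int.toStr y ++ " "
        let st' :=
          if v = 0 then (st.1 ++ ["(player " ++ obj ++ ")\n"], st.2.1, st.2.2)
          else if v = 2 then (st.1, st.2.1 ++ ["(box " ++ obj ++ ")\n"], st.2.2)
          else if v = 3 then (st.1 ++ ["(box " ++ obj ++ ")\n"], st.2.1, st.2.2)
          else st
        (st'.1, st'.2.1, st'.2.2 ++ [obj])) st) (([], [], []) : List String × List String × List String)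

-- ===== PORT B =====
def pvCell (x y : Int) : String := "f_" ++ PySem.Int.toStr x ++ "_" ++ PySem.Int.toStr y ++ " "

-- three independent comprehensions over enumerate
def generate_elements_alt (game_matrix : List (List Int)) : List String × List String × List String :=
  let inits := (PySem.List.enumerate game_matrix 0).flatMap (fun yr =>
    (PySem.List.enumerate yr.2 0).filterMap (fun xv =>
      if xv.2 = 0 ∨ xv.2 = 3 then
        some (if xv.2 = 0 then "(player " ++ pvCell xv.1 yr.1 ++ ")\n"
              else "(box " ++ pvCell xv.1 yr.1 ++ ")\n")
      else none))
  let goals := (PySem.List.enumerate game_matrix 0).flatMap (fun yr =>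
    (PySem.List.enumerate yr.2 0).filterMap (fun xv =>
      if xv.2 = 2 then some ("(box " ++ pvCell xv.1 yr.1 ++ ")\n") else none))
  let objects := (PySem.List.enumerate game_matrix 0).flatMap (fun yr =>
    (PySem.List.enumerate yr.2 0).filterMap (fun xv =>
      if xv.2 ≠ 1 then some (pvCell xv.1 yr.1) else none))
  (inits, goals, objects)

-- ===== PRECONDITION & SPEC =====
def Spec_generate_elements (game_matrix : List (List Int)) (out : List String × List String × List String) : Prop := out = generate_elements_alt game_matrix
instance (game_matrix : List (List Int)) (out : List String × List String × List String) : Decidable (Spec_generate_elements game_matrix out) := by unfold Spec_generate_elements; infer_instance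

-- ===== CLAIM (what is proved, stated in full; the proofs are below) =====
def Claim_equal_generate_elements : Prop := ∀ (game_matrix : List (List Int)), Dom_generate_elements game_matrix → Spec_generate_elements game_matrix (generate_elements game_matrix)

-- ===== LEMMAS AND PROOFS =====

-- A's inner loop step, named for the proofs
def pvInner (y : Int) (st : List String × List String × List String) (xv : Int × Int) :
    List String × List String × List String :=
  let v := xv.2
  if v = 1 then st
  else
    let obj := "f_" ++ PySem.Int.toStr xv.1 ++ "_" ++ PySem.Int.toStr y ++ " "
    let st' :=
      if v = 0 then (st.1 ++ ["(player " ++ obj ++ ")\n"], st.2.1, st.2.2)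
      else if v = 2 then (st.1, st.2.1 ++ ["(box " ++ obj ++ ")\n"], st.2.2)
      else if v = 3 then (st.1 ++ ["(box " ++ obj ++ ")\n"], st.2.1, st.2.2)
      else st
    (st'.1, st'.2.1, st'.2.2 ++ [obj])

def pvRowI (y : Int) (r : List Int) (s : Int) : List String :=
  (PySem.List.enumerate r s).filterMap (fun xv =>
    if xv.2 = 0 ∨ xv.2 = 3 then
      some (if xv.2 = 0 then "(player " ++ pvCell xv.1 y ++ ")\n"
            else "(box " ++ pvCell xv.1 y ++ ")\n")
    else none)

def pvRowG (y : Int) (r : List Int) (s : Int) : List String :=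
  (PySem.List.enumerate r s).filterMap (fun xv =>
    if xv.2 = 2 then some ("(box " ++ pvCell xv.1 y ++ ")\n") else none)

def pvRowO (y : Int) (r : List Int) (s : Int) : List String :=
  (PySem.List.enumerate r s).filterMap (fun xv =>
    if xv.2 ≠ 1 then some (pvCell xv.1 y) else none)

theorem pvInner_fold (y : Int) (r : List Int) :
    ∀ (s : Int) (a b c : List String),
    (PySem.List.enumerate r s).foldl (pvInner y) (a, b, c)
      = (a ++ pvRowI y r s, b ++ pvRowG y r s, c ++ pvRowO y r s) := by
  induction r with
  | nil => intro s a b c; simp [PySem.List.enumerate_nil, pvRowI, pvRowG, pvRowO]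
  | cons v t ih =>
    intro s a b c
    simp only [PySem.List.enumerate_cons, List.foldl_cons]
    by_cases h1 : v = 1
    · simp [pvInner, pvRowI, pvRowG, pvRowO, PySem.List.enumerate_cons, h1, ih]
    · by_cases h0 : v = 0
      · simp [pvInner, pvRowI, pvRowG, pvRowO, PySem.List.enumerate_cons, h0, ih, pvCell]
      · by_cases h2 : v = 2
        · simp [pvInner, pvRowI, pvRowG, pvRowO, PySem.List.enumerate_cons, h1, h0, h2, ih, pvCell]
        · by_cases h3 : v = 3
          · simp [pvInner, pvRowI, pvRowG, pvRowO, PySem.List.enumerate_cons, h1, h0, h2, h3, ih, pvCell]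
          · simp [pvInner, pvRowI, pvRowG, pvRowO, PySem.List.enumerate_cons, h1, h0, h2, h3, ih, pvCell]

-- A's outer loop step over (y, row)
def pvOuter (st : List String × List String × List String) (yr : Int × List Int) :
    List String × List String × List String :=
  (PySem.List.pyRange 0 (yr.2.length : Int) 1).foldl (fun st x =>
    pvInner yr.1 st (x, PySem.List.pyGetD yr.2 x 0)) st

theorem pvOuter_eq (st : List String × List String × List String) (yr : Int × List Int) :
    pvOuter st yr = (PySem.List.enumerate yr.2 0).foldl (pvInner yr.1) st := by
  unfold pvOuter
  rw [PySem.List.enumerate_eq_map_pyRange yr.2 (0 : Int), List.foldl_map]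
  simp [PySem.List.len]

theorem pvOuter_fold (gm : List (List Int)) :
    ∀ (s : Int) (a b c : List String),
    (PySem.List.enumerate gm s).foldl pvOuter (a, b, c)
      = (a ++ (PySem.List.enumerate gm s).flatMap (fun yr => pvRowI yr.1 yr.2 0),
         b ++ (PySem.List.enumerate gm s).flatMap (fun yr => pvRowG yr.1 yr.2 0),
         c ++ (PySem.List.enumerate gm s).flatMap (fun yr => pvRowO yr.1 yr.2 0)) := by
  induction gm with
  | nil => intro s a b c; simp [PySem.List.enumerate_nil]
  | cons r t ih =>
    intro s a b c
    simp only [PySem.List.enumerate_cons, List.foldl_cons, List.flatMap_cons]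
    rw [pvOuter_eq, pvInner_fold, ih]
    simp [List.append_assoc]

-- ===== VERDICT (by name: the statement is the Claim_ definition above) =====
theorem generate_elements_spec : Claim_equal_generate_elements := by
  intro gm _
  show generate_elements gm = generate_elements_alt gm
  have hA : generate_elements gm = (PySem.List.enumerate gm 0).foldl pvOuter ([], [], []) := by
    unfold generate_elements
    rw [PySem.List.enumerate_eq_map_pyRange gm ([] : List Int), List.foldl_map]
    rfl
  rw [hA, pvOuter_fold]
  rfl
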